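-- pv_equiv track=rewrite | github.com/cjo93/frags | synth_engine/api/ai.py | _truncate_to_preview
-- ===== SOURCE A (Python) =====
-- def _truncate_to_preview(text: str, max_chars: int = 280) -> str:
--     """
--     Truncate text to approximately 2 sentences or max_chars, whichever is shorter.
--     Tries to end at a sentence boundary.
--     """
--     if len(text) <= max_chars:
--         return text
--
--     # Find sentence boundaries within the limit
--     sentence_endings = ['.', '!', '?']
--     truncated = text[:max_chars]
--
--     # Look for the last sentence ending
--     last_end = -1
--     for i, char in enumerate(truncated):
--         if char in sentence_endings and i > 50:  # At least 50 chars
--             last_end = i + 1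
--             # Check if we have ~2 sentences
--             count = sum(1 for c in truncated[:i+1] if c in sentence_endings)
--             if count >= 2:
--                 break
--
--     if last_end > 50:
--         return truncated[:last_end].strip()
--
--     # Fall back to word boundary
--     space_idx = truncated.rfind(' ')
--     if space_idx > 50:
--         return truncated[:space_idx].strip() + "..."
--
--     return truncated.strip() + "..."
-- ===== SOURCE B (Python) =====
-- def _truncate_to_preview(text: str, max_chars: int = 280) -> str:
--     if len(text) <= max_chars:
--         return text
--
--     truncated = text[:max_chars]
--
--     # Table of sentence-ending positions, then select the break point from it.
--     ends = [i for i, c in enumerate(truncated) if c in '.!?']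
--     sel = next((p for j, p in enumerate(ends) if j >= 1 and p > 50), None)
--     if sel is not None:
--         last_end = sel + 1
--     elif ends and ends[0] > 50:
--         last_end = ends[0] + 1
--     else:
--         last_end = -1
--
--     if last_end > 50:
--         return truncated[:last_end].strip()
--
--     space_idx = truncated.rfind(' ')
--     if space_idx > 50:
--         return truncated[:space_idx].strip() + "..."
--
--     return truncated.strip() + "..."
-- ===== Notes on version B (the rewrite author's own statement) =====
-- stated objective: alternative
-- what changed: Replaces A's stateful char-by-char scan with breaks and a prefix re-count at each late sentence ending by an index table of sentence-ending positions built once, from which the break point is selected by a first-match rule; the word-boundary and strip fallbacks are kept verbatim.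
import Mathlib
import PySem

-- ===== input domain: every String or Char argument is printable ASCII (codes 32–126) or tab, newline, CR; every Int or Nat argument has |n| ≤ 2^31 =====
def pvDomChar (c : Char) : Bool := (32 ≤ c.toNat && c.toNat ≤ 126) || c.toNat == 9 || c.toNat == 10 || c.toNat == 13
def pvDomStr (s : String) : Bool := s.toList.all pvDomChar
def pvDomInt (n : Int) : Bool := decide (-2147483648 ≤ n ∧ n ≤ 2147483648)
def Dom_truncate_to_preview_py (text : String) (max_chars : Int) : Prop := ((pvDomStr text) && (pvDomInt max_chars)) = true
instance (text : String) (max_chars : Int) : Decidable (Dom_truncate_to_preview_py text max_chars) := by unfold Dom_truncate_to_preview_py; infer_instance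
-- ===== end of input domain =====

-- B replaces A's char-by-char scan with re-counting slices by an index table of sentence
-- endings built once and a first-match selection over it (objective: simpler/alternative).

-- ===== PORT A =====
-- sentence_endings = ['.', '!', '?']
def pvEndingsA : List Char := ['.', '!', '?']

-- the 'for i, char in enumerate(truncated)' loop with early break; 'sum(1 for c in truncated[:i+1] if c in sentence_endings)' is countP
def pvLoopA (truncated : List Char) : List (Int × Char) → Int → Int
  | [], last_end => last_end
  | (i, c) :: rest, last_end =>
    if c ∈ pvEndingsA ∧ i > 50 then
      let last_end' := i + 1
      let count := (PySem.List.slice truncated none (some (i + 1))).countP (fun ch => ch ∈ pvEndingsA)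
      if count ≥ 2 then last_end' else pvLoopA truncated rest last_end'
    else pvLoopA truncated rest last_end

def truncate_to_preview_py (text : String) (max_chars : Int) : String :=
  let cs := text.toList
  if (cs.length : Int) ≤ max_chars then text
  else
    let truncated := PySem.List.slice cs none (some max_chars)
    let last_end := pvLoopA truncated (PySem.List.enumerate truncated 0) (-1)
    if last_end > 50 then
      String.ofList (PySem.Chars.strip (PySem.List.slice truncated none (some last_end)))
    else
      let space_idx := PySem.Chars.rfind truncated [' ']
      if space_idx > 50 then
        String.ofList (PySem.Chars.strip (PySem.List.slice truncated none (some space_idx)) ++ "...".toList)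
      else
        String.ofList (PySem.Chars.strip truncated ++ "...".toList)

-- ===== PORT B =====
def truncate_to_preview_py_alt (text : String) (max_chars : Int) : String :=
  let cs := text.toList
  if (cs.length : Int) ≤ max_chars then text
  else
    let truncated := PySem.List.slice cs none (some max_chars)
    -- ends = [i for i, c in enumerate(truncated) if c in '.!?']
    let ends := (PySem.List.enumerate truncated 0).filterMap
      (fun p => if p.2 ∈ ['.', '!', '?'] then some p.1 else none)
    -- sel = next((p for j, p in enumerate(ends) if j >= 1 and p > 50), None)
    let sel := (PySem.List.enumerate ends 0).find? (fun q => decide (q.1 ≥ 1) && decide (q.2 > 50))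
    let last_end :=
      match sel with
      | some q => q.2 + 1
      | none =>
        match ends with
        | [] => (-1 : Int)
        | e0 :: _ => if e0 > 50 then e0 + 1 else -1
    if last_end > 50 then
      String.ofList (PySem.Chars.strip (PySem.List.slice truncated none (some last_end)))
    else
      let space_idx := PySem.Chars.rfind truncated [' ']
      if space_idx > 50 then
        String.ofList (PySem.Chars.strip (PySem.List.slice truncated none (some space_idx)) ++ "...".toList)
      else
        String.ofList (PySem.Chars.strip truncated ++ "...".toList)

-- ===== PRECONDITION & SPEC =====
def Spec_truncate_to_preview_py (text : String) (max_chars : Int) (out : String) : Prop := out = truncate_to_preview_py_alt text max_chars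
instance (text : String) (max_chars : Int) (out : String) : Decidable (Spec_truncate_to_preview_py text max_chars out) := by unfold Spec_truncate_to_preview_py; infer_instance

-- ===== CLAIM (what is proved, stated in full; the proofs are below) =====
def Claim_equal_truncate_to_preview_py : Prop := ∀ (text : String) (max_chars : Int), Dom_truncate_to_preview_py text max_chars → Spec_truncate_to_preview_py text max_chars (truncate_to_preview_py text max_chars)

-- ===== LEMMAS AND PROOFS =====

-- proof-only model of A's loop that carries the count of endings seen so far
def pvLoopA' : List (Int × Char) → Nat → Int → Int
  | [], _, last_end => last_end
  | (i, c) :: rest, cnt, last_end =>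
    if c ∈ pvEndingsA then
      if i > 50 then
        (if cnt + 1 ≥ 2 then i + 1 else pvLoopA' rest (cnt + 1) (i + 1))
      else pvLoopA' rest (cnt + 1) last_end
    else pvLoopA' rest cnt last_end

def pvEndsOf (pairs : List (Int × Char)) : List Int :=
  pairs.filterMap (fun p => if p.2 ∈ pvEndingsA then some p.1 else none)

-- A's loop equals the cnt-carrying model, tracking the processed prefix
theorem pvLoopA_eq_loopA' (suf : List Char) : ∀ (pre : List Char) (le : Int),
    pvLoopA (pre ++ suf) (PySem.List.enumerate suf (pre.length : Int)) le
      = pvLoopA' (PySem.List.enumerate suf (pre.length : Int)) (pre.countP (fun ch => ch ∈ pvEndingsA)) le := by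
  induction suf with
  | nil => intro pre le; simp [PySem.List.enumerate, pvLoopA, pvLoopA']
  | cons c rest ih =>
    intro pre le
    rw [PySem.List.enumerate_cons]
    by_cases hc : c ∈ pvEndingsA
    · have hslice : PySem.List.slice (pre ++ c :: rest) none (some ((pre.length : Int) + 1))
          = pre ++ [c] := by
        have h1 : ((pre.length : Int) + 1) = ((pre.length + 1 : Nat) : Int) := by push_cast; ring
        rw [h1, PySem.List.slice_to_natCast]
        simp [List.take_append]
      have hcnt : (pre ++ [c]).countP (fun ch => decide (ch ∈ pvEndingsA))
          = pre.countP (fun ch => decide (ch ∈ pvEndingsA)) + 1 := by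
        simp [List.countP_append, hc]
      by_cases hi : (pre.length : Int) > 50
      · simp only [pvLoopA, pvLoopA', hc, hi, and_true, if_true, hslice, hcnt]
        by_cases h2 : pre.countP (fun ch => decide (ch ∈ pvEndingsA)) + 1 ≥ 2
        · simp [h2]
        · simp only [h2, if_false]
          have := ih (pre ++ [c]) ((pre.length : Int) + 1)
          simpa [List.append_assoc, hcnt] using this
      · have hcond : ¬ (c ∈ pvEndingsA ∧ (pre.length : Int) > 50) := by tauto
        simp only [pvLoopA, pvLoopA', hc, hi, if_true, if_false]
        have := ih (pre ++ [c]) le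
        simpa [List.append_assoc, hcnt] using this
    · have hcond : ¬ (c ∈ pvEndingsA ∧ (pre.length : Int) > 50) := by tauto
      simp only [pvLoopA, pvLoopA', hc, if_false]
      have := ih (pre ++ [c]) le
      have hcnt : (pre ++ [c]).countP (fun ch => decide (ch ∈ pvEndingsA))
          = pre.countP (fun ch => decide (ch ∈ pvEndingsA)) := by
        simp [List.countP_append, hc]
      simpa [List.append_assoc, hcnt] using this

-- the cnt ≥ 1 case: the first ending beyond position 50 breaks the loop at once
theorem pvLoopA'_pos (pairs : List (Int × Char)) : ∀ (cnt : Nat) (le : Int), 1 ≤ cnt →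
    pvLoopA' pairs cnt le
      = match (pvEndsOf pairs).find? (fun p => decide (p > 50)) with
        | some p => p + 1
        | none => le := by
  induction pairs with
  | nil => intro cnt le _; simp [pvLoopA', pvEndsOf]
  | cons pc rest ih =>
    intro cnt le hcnt
    obtain ⟨i, c⟩ := pc
    by_cases hc : c ∈ pvEndingsA
    · by_cases hi : i > 50
      · have h2 : cnt + 1 ≥ 2 := by omega
        simp [pvLoopA', pvEndsOf, hc, hi, h2]
      · simp only [pvLoopA', hc, hi, if_true, if_false]
        rw [ih (cnt + 1) le (by omega)]
        simp [pvEndsOf, hc, hi]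
    · simp only [pvLoopA', hc, if_false]
      rw [ih cnt le hcnt]
      simp [pvEndsOf, hc]

-- the cnt = 0 case, phrased over the table of ending positions
theorem pvLoopA'_zero (pairs : List (Int × Char)) : ∀ (le : Int),
    pvLoopA' pairs 0 le
      = match pvEndsOf pairs with
        | [] => le
        | e0 :: rest =>
          match rest.find? (fun p => decide (p > 50)) with
          | some p => p + 1
          | none => if e0 > 50 then e0 + 1 else le := by
  induction pairs with
  | nil => intro le; simp [pvLoopA', pvEndsOf]
  | cons pc rest ih =>
    intro le
    obtain ⟨i, c⟩ := pc
    by_cases hc : c ∈ pvEndingsA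
    · by_cases hi : i > 50
      · simp only [pvLoopA', hc, hi, if_true]
        norm_num
        rw [pvLoopA'_pos rest 1 (i + 1) (by omega)]
        simp [pvEndsOf, hc, hi]
      · simp only [pvLoopA', hc, hi, if_true, if_false]
        rw [pvLoopA'_pos rest 1 le (by omega)]
        simp [pvEndsOf, hc, hi]
    · simp only [pvLoopA', hc, if_false]
      rw [ih le]
      simp [pvEndsOf, hc]

-- B's enumerated selection over the tail (all indices ≥ 1) is a plain find?
theorem pvFind_enum (rest : List Int) : ∀ (s : Int), 1 ≤ s →
    ((PySem.List.enumerate rest s).find? (fun q => decide (q.1 ≥ 1) && decide (q.2 > 50))).map (·.2)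
      = rest.find? (fun p => decide (p > 50)) := by
  induction rest with
  | nil => intro s _; simp [PySem.List.enumerate]
  | cons p ps ih =>
    intro s hs
    rw [PySem.List.enumerate_cons]
    by_cases hp : p > 50
    · simp [hs, hp]
    · simp only [List.find?_cons]
      have : (decide (s ≥ 1) && decide (p > 50)) = false := by simp [hp]
      rw [this]
      simp only [decide_eq_false hp]
      exact ih (s + 1) (by omega)

-- the two last_end computations agree
theorem pvLastEnd_eq (truncated : List Char) :
    pvLoopA truncated (PySem.List.enumerate truncated 0) (-1)
      = (match (PySem.List.enumerate
            ((PySem.List.enumerate truncated 0).filterMap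
              (fun p => if p.2 ∈ ['.', '!', '?'] then some p.1 else none)) 0).find?
            (fun q => decide (q.1 ≥ 1) && decide (q.2 > 50)) with
        | some q => q.2 + 1
        | none =>
          match (PySem.List.enumerate truncated 0).filterMap
              (fun p => if p.2 ∈ ['.', '!', '?'] then some p.1 else none) with
          | [] => (-1 : Int)
          | e0 :: _ => if e0 > 50 then e0 + 1 else -1) := by
  have hA : pvLoopA truncated (PySem.List.enumerate truncated 0) (-1)
      = pvLoopA' (PySem.List.enumerate truncated 0) 0 (-1) := by
    have := pvLoopA_eq_loopA' truncated [] (-1)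
    simpa using this
  rw [hA, pvLoopA'_zero]
  have hEnds : (PySem.List.enumerate truncated 0).filterMap
      (fun p => if p.2 ∈ ['.', '!', '?'] then some p.1 else none)
      = pvEndsOf (PySem.List.enumerate truncated 0) := by
    simp [pvEndsOf, pvEndingsA]
  rw [hEnds]
  cases hE : pvEndsOf (PySem.List.enumerate truncated 0) with
  | nil => simp [PySem.List.enumerate]
  | cons e0 rest =>
    rw [PySem.List.enumerate_cons]
    have hfind := pvFind_enum rest 1 (by omega)
    have h0 : (decide ((0:Int) ≥ 1) && decide (e0 > 50)) = false := by simp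
    rw [List.find?_cons, h0]
    cases hr : rest.find? (fun p => decide (p > 50)) with
    | some p =>
      rw [hr] at hfind
      cases hq : (PySem.List.enumerate rest 1).find? (fun q => decide (q.1 ≥ 1) && decide (q.2 > 50)) with
      | none => rw [hq] at hfind; simp at hfind
      | some q =>
        rw [hq] at hfind
        simp at hfind
        simp [hr, hq, hfind]
    | none =>
      rw [hr] at hfind
      cases hq : (PySem.List.enumerate rest 1).find? (fun q => decide (q.1 ≥ 1) && decide (q.2 > 50)) with
      | some q => rw [hq] at hfind; simp at hfind
      | none => simp [hr, hq]

-- ===== VERDICT (by name: the statement is the Claim_ definition above) =====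
theorem truncate_to_preview_py_spec : Claim_equal_truncate_to_preview_py := by
  intro text max_chars _
  simp only [Spec_truncate_to_preview_py, truncate_to_preview_py, truncate_to_preview_py_alt]
  rw [pvLastEnd_eq]
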